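-- pv_equiv track=rewrite | github.com/georgeebili/richdjango | Component/DarkArt/MagicBox.py | isNameFieldValid
-- ===== SOURCE A (Python) =====
-- __symbols__ = ['~','`','!','@','#','$','%','^','&','*','(',')',
--     '_','+','=','-','{','}','\\','|',':','"',';','<','>','?',
--     '.',',',"'",'/'
-- ]
--
-- def isTextLengthValid(text: str, wordMinLenght=1, wordMaxLenght=1,
--         minLength=1, maxLength=15):
--     cleanText = text.strip()
--     if cleanText.__len__() > maxLength: return False
--     if cleanText.__len__() < minLength: return False
--     if cleanText.split(' ').__len__() > wordMaxLenght: return False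
--     if cleanText.split(' ').__len__() < wordMinLenght: return False
--     return True
--
-- def isNameFieldValid(text: str, wordMinLenght=1, wordMaxLenght=1,
--         minLength=1, maxLength=15, exceptCharacter=[]):
--
--     # check text length
--     if not isTextLengthValid(
--         text, wordMinLenght, wordMaxLenght, minLength, maxLength):
--         return False
--
--     # check is number in text
--     numbers = ['1','2','3','4','5','6','7','8','9','0']
--     nums = [n for n in numbers if not exceptCharacter.__contains__(n)]
--     for n in nums:
--         if n in text: return False
--
--     # check is symbol in text
--     _symbols = [ x for x in __symbols__ if not exceptCharacter.__contains__(x) ]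
--     for s in _symbols:
--         if s in text: return False
--
--     return True
-- ===== SOURCE B (Python) =====
-- __symbols__ = ['~','`','!','@','#','$','%','^','&','*','(',')',
--     '_','+','=','-','{','}','\\','|',':','"',';','<','>','?',
--     '.',',',"'",'/'
-- ]
--
-- def isTextLengthValid(text: str, wordMinLenght=1, wordMaxLenght=1,
--         minLength=1, maxLength=15):
--     cleanText = text.strip()
--     if len(cleanText) > maxLength: return False
--     if len(cleanText) < minLength: return False
--     words = len(cleanText.split(' '))
--     return wordMinLenght <= words <= wordMaxLenght
--
-- def isNameFieldValid(text: str, wordMinLenght=1, wordMaxLenght=1,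
--         minLength=1, maxLength=15, exceptCharacter=[]):
--     if not isTextLengthValid(
--             text, wordMinLenght, wordMaxLenght, minLength, maxLength):
--         return False
--     # one forbidden set; scan the text's characters once instead of
--     # scanning the text once per forbidden character
--     forbidden = (set('1234567890') | set(__symbols__)) - set(exceptCharacter)
--     return all(c not in forbidden for c in text)
-- ===== Notes on version B (the rewrite author's own statement) =====
-- stated objective: idiomatic
-- what changed: Instead of scanning the text once per forbidden character (10 digits + 30 symbols, each a substring search), B builds one forbidden set (digits | symbols) - exceptCharacter and makes a single pass over the text's characters with set lookup.
import Mathlib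
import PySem

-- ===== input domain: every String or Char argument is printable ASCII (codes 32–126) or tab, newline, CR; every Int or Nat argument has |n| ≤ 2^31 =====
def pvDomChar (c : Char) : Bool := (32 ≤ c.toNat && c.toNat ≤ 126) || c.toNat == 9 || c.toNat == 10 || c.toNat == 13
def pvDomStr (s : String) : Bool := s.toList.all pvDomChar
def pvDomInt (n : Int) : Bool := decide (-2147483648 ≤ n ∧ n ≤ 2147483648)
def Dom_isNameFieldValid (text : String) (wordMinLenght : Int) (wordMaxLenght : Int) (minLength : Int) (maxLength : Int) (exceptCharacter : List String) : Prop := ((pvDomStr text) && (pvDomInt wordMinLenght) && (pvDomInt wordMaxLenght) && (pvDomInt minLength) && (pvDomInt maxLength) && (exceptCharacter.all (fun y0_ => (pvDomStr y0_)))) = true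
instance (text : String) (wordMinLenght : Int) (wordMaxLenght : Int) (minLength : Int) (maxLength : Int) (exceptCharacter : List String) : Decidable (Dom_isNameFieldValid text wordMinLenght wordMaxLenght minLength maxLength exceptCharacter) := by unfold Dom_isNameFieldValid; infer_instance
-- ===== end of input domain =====

-- B replaces A's per-forbidden-character substring scans by one forbidden set and a single pass over the text's characters (idiomatic rewrite, same result).

-- ===== PORT A =====
def pySymbols : List String := ["~","`","!","@","#","$","%","^","&","*","(",")",
    "_","+","=","-","{","}","\\","|",":","\"",";","<",">","?",
    ".",",","'","/"]

def isTextLengthValid (text : String) (wordMinLenght wordMaxLenght minLength maxLength : Int) : Bool :=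
  let cleanText := PySem.Str.strip text
  if PySem.Str.len cleanText > maxLength then false
  else if PySem.Str.len cleanText < minLength then false
  else if (((PySem.Str.split? cleanText " ").getD []).length : Int) > wordMaxLenght then false
  else if (((PySem.Str.split? cleanText " ").getD []).length : Int) < wordMinLenght then false
  else true

def isNameFieldValid (text : String) (wordMinLenght : Int) (wordMaxLenght : Int) (minLength : Int) (maxLength : Int) (exceptCharacter : List String) : Bool :=
  if !(isTextLengthValid text wordMinLenght wordMaxLenght minLength maxLength) then false
  else
    let numbers : List String := ["1","2","3","4","5","6","7","8","9","0"]
    let nums := numbers.filter (fun n => !(exceptCharacter.contains n))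
    if nums.any (fun n => PySem.Str.isIn n text) then false
    else
      let symbols := pySymbols.filter (fun x => !(exceptCharacter.contains x))
      if symbols.any (fun s => PySem.Str.isIn s text) then false
      else true

-- ===== PORT B =====
def isTextLengthValid_alt (text : String) (wordMinLenght wordMaxLenght minLength maxLength : Int) : Bool :=
  let cleanText := PySem.Str.strip text
  if PySem.Str.len cleanText > maxLength then false
  else if PySem.Str.len cleanText < minLength then false
  else
    let words : Int := ((PySem.Str.split? cleanText " ").getD []).length
    wordMinLenght ≤ words && words ≤ wordMaxLenght

-- set('1234567890') is a set of one-character strings, in this order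
def pyDigitSet : List String := ["1","2","3","4","5","6","7","8","9","0"]

def isNameFieldValid_alt (text : String) (wordMinLenght : Int) (wordMaxLenght : Int) (minLength : Int) (maxLength : Int) (exceptCharacter : List String) : Bool :=
  if !(isTextLengthValid_alt text wordMinLenght wordMaxLenght minLength maxLength) then false
  else
    let forbidden := PySem.Set.diff
      (PySem.Set.union (PySem.Set.ofList pyDigitSet) (PySem.Set.ofList pySymbols))
      (PySem.Set.ofList exceptCharacter)
    -- iterating a Python str yields its one-character strings
    text.toList.all (fun c => !(PySem.Set.contains forbidden (String.ofList [c])))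

-- ===== PRECONDITION & SPEC =====
def Spec_isNameFieldValid (text : String) (wordMinLenght : Int) (wordMaxLenght : Int) (minLength : Int) (maxLength : Int) (exceptCharacter : List String) (out : Bool) : Prop := out = isNameFieldValid_alt text wordMinLenght wordMaxLenght minLength maxLength exceptCharacter
instance (text : String) (wordMinLenght : Int) (wordMaxLenght : Int) (minLength : Int) (maxLength : Int) (exceptCharacter : List String) (out : Bool) : Decidable (Spec_isNameFieldValid text wordMinLenght wordMaxLenght minLength maxLength exceptCharacter out) := by unfold Spec_isNameFieldValid; infer_instance

-- ===== CLAIM (what is proved, stated in full; the proofs are below) =====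
def Claim_equal_isNameFieldValid : Prop := ∀ (text : String) (wordMinLenght : Int) (wordMaxLenght : Int) (minLength : Int) (maxLength : Int) (exceptCharacter : List String), Dom_isNameFieldValid text wordMinLenght wordMaxLenght minLength maxLength exceptCharacter → Spec_isNameFieldValid text wordMinLenght wordMaxLenght minLength maxLength exceptCharacter (isNameFieldValid text wordMinLenght wordMaxLenght minLength maxLength exceptCharacter)

-- ===== LEMMAS AND PROOFS =====

theorem lenValid_eq (text : String) (a b c d : Int) :
    isTextLengthValid text a b c d = isTextLengthValid_alt text a b c d := by
  unfold isTextLengthValid isTextLengthValid_alt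
  dsimp only
  generalize PySem.Str.len (PySem.Str.strip text) = L
  generalize ((PySem.Str.split? (PySem.Str.strip text) " ").getD []).length = W
  split_ifs <;> simp <;> omega

theorem singleton_infix (c : Char) (l : List Char) : [c] <:+: l ↔ c ∈ l := by
  constructor
  · intro h; exact h.sublist.mem (by simp)
  · intro h; obtain ⟨s, t, rfl⟩ := List.append_of_mem h; exact ⟨s, t, by simp⟩

theorem isIn_singleton (c : Char) (t : String) :
    PySem.Str.isIn (String.ofList [c]) t = true ↔ c ∈ t.toList := by
  rw [PySem.Str.isIn_iff_infix]
  simp [singleton_infix]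

-- A's loop over forbidden one-character strings = a loop over the text's characters
theorem any_isIn_swap (L : List String) (t : String)
    (h : ∀ s ∈ L, ∃ c, s = String.ofList [c]) :
    L.any (fun n => PySem.Str.isIn n t)
      = t.toList.any (fun c => L.contains (String.ofList [c])) := by
  rw [Bool.eq_iff_iff]
  simp only [List.any_eq_true, List.contains_eq_mem, decide_eq_true_eq]
  constructor
  · rintro ⟨n, hn, hin⟩
    obtain ⟨c, rfl⟩ := h n hn
    exact ⟨c, (isIn_singleton c t).1 hin, hn⟩
  · rintro ⟨c, hc, hm⟩
    exact ⟨_, hm, (isIn_singleton c t).2 hc⟩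

theorem all_singletons : ∀ s ∈ pyDigitSet ++ pySymbols, ∃ c, s = String.ofList [c] := by
  intro s hs
  fin_cases hs <;> exact ⟨_, rfl⟩

-- B's set membership = membership in A's filtered forbidden list
theorem contains_forbidden (x : String) (ex : List String) :
    (PySem.Set.contains (PySem.Set.diff
        (PySem.Set.union (PySem.Set.ofList pyDigitSet) (PySem.Set.ofList pySymbols))
        (PySem.Set.ofList ex)) x)
      = ((pyDigitSet ++ pySymbols).filter (fun n => !(ex.contains n))).contains x := by
  rw [Bool.eq_iff_iff, PySem.Set.contains_iff, PySem.Set.mem_diff, PySem.Set.mem_union]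
  simp only [PySem.Set.mem_ofList, List.contains_eq_mem, List.mem_filter, List.mem_append,
    Bool.not_eq_eq_eq_not, Bool.not_true, decide_eq_false_iff_not, decide_eq_true_eq]

-- ===== VERDICT (by name: the statement is the Claim_ definition above) =====
theorem isNameFieldValid_spec : Claim_equal_isNameFieldValid := by
  intro text a b c d ex _
  unfold Spec_isNameFieldValid isNameFieldValid isNameFieldValid_alt
  rw [lenValid_eq]
  cases isTextLengthValid_alt text a b c d
  · simp
  · simp only [Bool.not_true, Bool.false_eq_true, if_false]
    show (if (pyDigitSet.filter (fun n => !(ex.contains n))).any (fun n => PySem.Str.isIn n text) then false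
          else if (pySymbols.filter (fun x => !(ex.contains x))).any (fun s => PySem.Str.isIn s text) then false
          else true) = _
    have key : ((pyDigitSet.filter (fun n => !(ex.contains n))).any (fun n => PySem.Str.isIn n text)
          || (pySymbols.filter (fun n => !(ex.contains n))).any (fun n => PySem.Str.isIn n text))
        = text.toList.any (fun c => PySem.Set.contains (PySem.Set.diff
            (PySem.Set.union (PySem.Set.ofList pyDigitSet) (PySem.Set.ofList pySymbols))
            (PySem.Set.ofList ex)) (String.ofList [c])) := by
      rw [← List.any_append, ← List.filter_append,
        any_isIn_swap _ text (fun s hs => all_singletons s (List.mem_of_mem_filter hs))]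
      exact List.any_congr rfl (fun c => (contains_forbidden (String.ofList [c]) ex).symm)
    rw [List.all_eq_not_any_not]
    simp only [Bool.not_not]
    rw [← key]
    cases h1 : (pyDigitSet.filter (fun n => !(ex.contains n))).any (fun n => PySem.Str.isIn n text) <;>
      cases h2 : (pySymbols.filter (fun n => !(ex.contains n))).any (fun n => PySem.Str.isIn n text) <;>
      simp
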